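-- pv_equiv track=rewrite | github.com/Zelaron/Sprecher-Network | experiments/experiment1A/benchmarks/kan_sn_parity_bench.py | choose_kan_basis_for_parity
-- ===== SOURCE A (Python) =====
-- def kan_param_count(arch, input_dim, final_dim, n_basis, degree,
--                     bn_type, bn_position, bn_skip_first, residual_type):
--     """
--     Count parameters for KAN under the chosen residual_type.
--       - per-edge: n_basis coeffs + ws (+ wb if residual_type!='none')
--       - BUT for residual_type='linear' with a==b, **omit wb per-edge** and add **1 scalar** per layer.
--       - BN affine params
--       - output affine
--     """
--     dims = [input_dim] + list(arch) + [final_dim]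
--     total = 0
--     eff_basis = max(int(n_basis), int(degree) + 1)  # FIX: enforce minimum basis
--
--     for a, b in zip(dims[:-1], dims[1:]):
--         use_layer_scalar = (residual_type == "linear" and a == b)
--         layer_add_wb = (residual_type != "none") and not use_layer_scalar
--         per_edge = eff_basis + 1 + (1 if layer_add_wb else 0)  # coeffs + ws + (wb?)
--         total += per_edge * a * b
--         if use_layer_scalar:
--             total += 1  # α scalar for this layer
--     if bn_type == "batch":
--         for li, (a, b) in enumerate(zip(dims[:-1], dims[1:])):
--             if bn_position == "before" and not (bn_skip_first and li == 0):
--                 total += 2 * a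
--             if bn_position == "after"  and not (bn_skip_first and li == 0):
--                 total += 2 * b
--     total += (final_dim * 2)
--     return total
--
-- def choose_kan_basis_for_parity(target_params, arch, input_dim, final_dim,
--                                 degree, bn_type, bn_position, bn_skip_first,
--                                 residual_type, prefer_leq=True):
--     min_K = int(degree) + 1  # FIX: search only valid K
--     best_n = None; best_diff = float('inf'); best_count = None
--     for n in range(min_K, 200):
--         cnt = kan_param_count(arch, input_dim, final_dim, n, degree,
--                               bn_type, bn_position, bn_skip_first, residual_type)
--         diff = abs(cnt - target_params)
--         if prefer_leq:
--             if cnt <= target_params and diff < best_diff: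
--                 best_diff = diff; best_n = n; best_count = cnt
--         else:
--             if diff < best_diff:
--                 best_diff = diff; best_n = n; best_count = cnt
--     if best_n is None:
--         for n in range(min_K, 200):
--             cnt = kan_param_count(arch, input_dim, final_dim, n, degree,
--                                   bn_type, bn_position, bn_skip_first, residual_type)
--             if cnt >= target_params:
--                 return n, cnt
--         return 199, kan_param_count(arch, input_dim, final_dim, 199, degree,
--                                     bn_type, bn_position, bn_skip_first, residual_type)
--     return best_n, best_count
-- ===== SOURCE B (Python) =====
-- def choose_kan_basis_for_parity(target_params, arch, input_dim, final_dim,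
--                                 degree, bn_type, bn_position, bn_skip_first,
--                                 residual_type, prefer_leq=True):
--     # param count is affine in the basis size: cnt(n) = icpt + slope*n (for n >= degree+1).
--     dims = [input_dim] + list(arch) + [final_dim]
--     slope = 0
--     icpt = final_dim * 2
--     for a, b in zip(dims, dims[1:]):
--         e = a * b
--         slope += e
--         if residual_type == "linear" and a == b:
--             icpt += e + 1          # ws per edge + one layer scalar
--         elif residual_type != "none":
--             icpt += 2 * e          # ws + wb per edge
--         else:
--             icpt += e              # ws only
--     if bn_type == "batch":
--         for li, (a, b) in enumerate(zip(dims, dims[1:])):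
--             if bn_position == "before" and not (bn_skip_first and li == 0):
--                 icpt += 2 * a
--             if bn_position == "after" and not (bn_skip_first and li == 0):
--                 icpt += 2 * b
--     lo = degree + 1
--     counts = [(n, icpt + slope * n) for n in range(lo, 200)]
--     cand = [p for p in counts if p[1] <= target_params] if prefer_leq else counts
--     if cand:
--         return min(cand, key=lambda p: abs(p[1] - target_params))
--     for p in counts:
--         if p[1] >= target_params:
--             return p
--     return 199, icpt + slope * max(199, lo)
-- ===== Notes on version B (the rewrite author's own statement) =====
-- stated objective: alternative
-- what changed: A recomputes the full layer-by-layer parameter count for each of the up-to-199 candidate basis sizes; B exploits that the count is affine in the basis size, computes slope and intercept in one pass over the architecture, and then picks the best candidate among the precomputed affine values via filter + min-with-key / first match.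
import Mathlib
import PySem

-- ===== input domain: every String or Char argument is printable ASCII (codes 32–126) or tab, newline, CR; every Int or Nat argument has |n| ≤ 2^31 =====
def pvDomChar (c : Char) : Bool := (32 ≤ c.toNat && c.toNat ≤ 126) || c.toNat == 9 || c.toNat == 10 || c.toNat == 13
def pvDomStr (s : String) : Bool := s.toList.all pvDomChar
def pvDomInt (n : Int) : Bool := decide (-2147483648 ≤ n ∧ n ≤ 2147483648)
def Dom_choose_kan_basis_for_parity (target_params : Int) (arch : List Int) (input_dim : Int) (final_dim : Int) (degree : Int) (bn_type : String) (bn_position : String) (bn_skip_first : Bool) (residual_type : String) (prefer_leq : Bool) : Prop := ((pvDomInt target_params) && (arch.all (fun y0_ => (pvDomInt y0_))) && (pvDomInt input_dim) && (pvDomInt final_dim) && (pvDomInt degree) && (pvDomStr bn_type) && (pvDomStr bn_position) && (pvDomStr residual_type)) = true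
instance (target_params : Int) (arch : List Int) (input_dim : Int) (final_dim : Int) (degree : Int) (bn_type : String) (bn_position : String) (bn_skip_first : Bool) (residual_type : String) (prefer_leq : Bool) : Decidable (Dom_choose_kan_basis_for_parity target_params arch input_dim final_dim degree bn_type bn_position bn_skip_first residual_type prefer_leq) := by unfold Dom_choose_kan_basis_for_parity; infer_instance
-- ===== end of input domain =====

-- B replaces A's 200 full parameter recounts by a one-pass affine summary (slope, intercept)
-- of the count, then selects the best basis among the precomputed affine values.

-- B replaces A's 200 full parameter recounts by a single one-pass affine summary of the
-- count (slope, intercept), then selects the best basis among precomputed affine values.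

-- ===== PORT A =====
def pvKanParamCount (arch : List Int) (input_dim final_dim n_basis degree : Int)
    (bn_type bn_position : String) (bn_skip_first : Bool) (residual_type : String) : Int :=
  let dims : List Int := input_dim :: (arch ++ [final_dim])
  let eff_basis := max n_basis (degree + 1)
  let total : Int := (dims.dropLast.zip dims.tail).foldl (fun total ab =>
      let use_layer_scalar : Bool := residual_type == "linear" && ab.1 == ab.2
      let layer_add_wb : Bool := residual_type != "none" && !use_layer_scalar
      let per_edge := eff_basis + 1 + (if layer_add_wb then (1 : Int) else 0)
      let total := total + per_edge * ab.1 * ab.2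
      if use_layer_scalar then total + 1 else total) 0
  let total := if bn_type == "batch" then
      (PySem.List.enumerate (dims.dropLast.zip dims.tail) 0).foldl (fun total q =>
        let total := if bn_position == "before" && !(bn_skip_first && q.1 == 0) then total + 2 * q.2.1 else total
        if bn_position == "after" && !(bn_skip_first && q.1 == 0) then total + 2 * q.2.2 else total) total
    else total
  total + final_dim * 2

def choose_kan_basis_for_parity (target_params : Int) (arch : List Int) (input_dim : Int) (final_dim : Int) (degree : Int) (bn_type : String) (bn_position : String) (bn_skip_first : Bool) (residual_type : String) (prefer_leq : Bool) : Int × Int :=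
  let min_K := degree + 1
  let best := (PySem.List.pyRange min_K 200 1).foldl
    (fun (best : Option (Int × Int × Int)) n =>
      let cnt := pvKanParamCount arch input_dim final_dim n degree bn_type bn_position bn_skip_first residual_type
      let diff := |cnt - target_params|
      let improves : Bool := match best with | none => true | some t => decide (diff < t.1)
      if prefer_leq then
        if decide (cnt ≤ target_params) && improves then some (diff, n, cnt) else best
      else
        if improves then some (diff, n, cnt) else best)
    none
  match best with
  | some t => (t.2.1, t.2.2)
  | none =>
    match (PySem.List.pyRange min_K 200 1).find?
        (fun n => decide (pvKanParamCount arch input_dim final_dim n degree bn_type bn_position bn_skip_first residual_type ≥ target_params)) with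
    | some n => (n, pvKanParamCount arch input_dim final_dim n degree bn_type bn_position bn_skip_first residual_type)
    | none => (199, pvKanParamCount arch input_dim final_dim 199 degree bn_type bn_position bn_skip_first residual_type)

-- ===== PORT B =====
def pvAffine (arch : List Int) (input_dim final_dim : Int) (bn_type bn_position : String)
    (bn_skip_first : Bool) (residual_type : String) : Int × Int :=
  let dims : List Int := input_dim :: (arch ++ [final_dim])
  let pairs := dims.zip dims.tail
  let si := pairs.foldl (fun (s : Int × Int) p =>
      (s.1 + p.1 * p.2,
       if residual_type == "linear" && p.1 == p.2 then s.2 + p.1 * p.2 + 1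
       else if residual_type != "none" then s.2 + 2 * (p.1 * p.2)
       else s.2 + p.1 * p.2)) (0, final_dim * 2)
  let icpt := if bn_type == "batch" then
      (PySem.List.enumerate pairs 0).foldl (fun t q =>
        let t := if bn_position == "before" && !(bn_skip_first && q.1 == 0) then t + 2 * q.2.1 else t
        if bn_position == "after" && !(bn_skip_first && q.1 == 0) then t + 2 * q.2.2 else t) si.2
    else si.2
  (si.1, icpt)

def choose_kan_basis_for_parity_alt (target_params : Int) (arch : List Int) (input_dim : Int) (final_dim : Int) (degree : Int) (bn_type : String) (bn_position : String) (bn_skip_first : Bool) (residual_type : String) (prefer_leq : Bool) : Int × Int :=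
  let sc := pvAffine arch input_dim final_dim bn_type bn_position bn_skip_first residual_type
  let lo := degree + 1
  let counts := (PySem.List.pyRange lo 200 1).map (fun n => (n, sc.2 + sc.1 * n))
  let cand := if prefer_leq then counts.filter (fun p => decide (p.2 ≤ target_params)) else counts
  match PySem.List.min? cand (fun p => |p.2 - target_params|) with
  | some p => p
  | none =>
    match counts.find? (fun p => decide (p.2 ≥ target_params)) with
    | some p => p
    | none => (199, sc.2 + sc.1 * max 199 lo)

-- ===== PRECONDITION & SPEC =====
def Spec_choose_kan_basis_for_parity (target_params : Int) (arch : List Int) (input_dim : Int) (final_dim : Int) (degree : Int) (bn_type : String) (bn_position : String) (bn_skip_first : Bool) (residual_type : String) (prefer_leq : Bool) (out : Int × Int) : Prop := out = choose_kan_basis_for_parity_alt target_params arch input_dim final_dim degree bn_type bn_position bn_skip_first residual_type prefer_leq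
instance (target_params : Int) (arch : List Int) (input_dim : Int) (final_dim : Int) (degree : Int) (bn_type : String) (bn_position : String) (bn_skip_first : Bool) (residual_type : String) (prefer_leq : Bool) (out : Int × Int) : Decidable (Spec_choose_kan_basis_for_parity target_params arch input_dim final_dim degree bn_type bn_position bn_skip_first residual_type prefer_leq out) := by unfold Spec_choose_kan_basis_for_parity; infer_instance

-- ===== CLAIM (what is proved, stated in full; the proofs are below) =====
def Claim_equal_choose_kan_basis_for_parity : Prop := ∀ (target_params : Int) (arch : List Int) (input_dim : Int) (final_dim : Int) (degree : Int) (bn_type : String) (bn_position : String) (bn_skip_first : Bool) (residual_type : String) (prefer_leq : Bool), Dom_choose_kan_basis_for_parity target_params arch input_dim final_dim degree bn_type bn_position bn_skip_first residual_type prefer_leq → Spec_choose_kan_basis_for_parity target_params arch input_dim final_dim degree bn_type bn_position bn_skip_first residual_type prefer_leq (choose_kan_basis_for_parity target_params arch input_dim final_dim degree bn_type bn_position bn_skip_first residual_type prefer_leq)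

-- ===== LEMMAS AND PROOFS =====

theorem pv_zip_dropLast_tail (l : List Int) : l.dropLast.zip l.tail = l.zip l.tail := by
  induction l with
  | nil => rfl
  | cons a t ih =>
    cases t with
    | nil => rfl
    | cons b t' =>
      have h : (b :: t').dropLast.zip t' = (b :: t').zip t' := by simpa using ih
      simp only [List.tail_cons, List.dropLast_cons_of_ne_nil (List.cons_ne_nil b t'),
        List.zip_cons_cons, h]

theorem pv_kpc_eq (arch : List Int) (input_dim final_dim n degree : Int)
    (bt bp : String) (bs : Bool) (rt : String) :
    pvKanParamCount arch input_dim final_dim n degree bt bp bs rt =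
      (pvAffine arch input_dim final_dim bt bp bs rt).2 +
        (pvAffine arch input_dim final_dim bt bp bs rt).1 * max n (degree + 1) := by
  unfold pvKanParamCount pvAffine
  dsimp only
  rw [pv_zip_dropLast_tail]
  have hA : ∀ (total : Int) (ab : Int × Int),
      (if (rt == "linear" && ab.1 == ab.2) = true
       then total + (max n (degree + 1) + 1 +
         if (rt != "none" && !(rt == "linear" && ab.1 == ab.2)) = true then (1:Int) else 0) * ab.1 * ab.2 + 1
       else total + (max n (degree + 1) + 1 +
         if (rt != "none" && !(rt == "linear" && ab.1 == ab.2)) = true then (1:Int) else 0) * ab.1 * ab.2)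
      = total + ((if (rt == "linear" && ab.1 == ab.2) = true then ab.1 * ab.2 + 1
           else if (rt != "none") = true then 2 * (ab.1 * ab.2) else ab.1 * ab.2)
          + max n (degree + 1) * (ab.1 * ab.2)) := by
    intro total ab
    by_cases h1 : (rt == "linear" && ab.1 == ab.2) = true <;>
      by_cases h2 : (rt != "none") = true <;>
      simp [h1, h2] <;> ring
  simp only [hA]
  rw [PySem.List.foldl_add]
  rw [PySem.List.foldl_prod_mk (f := fun (x : Int) (p : Int × Int) => x + p.1 * p.2)
      (g := fun (x : Int) (p : Int × Int) =>
        if (rt == "linear" && p.1 == p.2) = true then x + p.1 * p.2 + 1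
        else if (rt != "none") = true then x + 2 * (p.1 * p.2) else x + p.1 * p.2)]
  have hG : ∀ (x : Int) (p : Int × Int),
      (if (rt == "linear" && p.1 == p.2) = true then x + p.1 * p.2 + 1
       else if (rt != "none") = true then x + 2 * (p.1 * p.2) else x + p.1 * p.2)
      = x + (if (rt == "linear" && p.1 == p.2) = true then p.1 * p.2 + 1
         else if (rt != "none") = true then 2 * (p.1 * p.2) else p.1 * p.2) := by
    intro x p
    split_ifs <;> ring
  have hBN : ∀ (total : Int) (q : Int × Int × Int),
      (if (bp == "after" && !(bs && q.1 == 0)) = true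
       then (if (bp == "before" && !(bs && q.1 == 0)) = true then total + 2 * q.2.1 else total) + 2 * q.2.2
       else (if (bp == "before" && !(bs && q.1 == 0)) = true then total + 2 * q.2.1 else total))
      = total + ((if (bp == "before" && !(bs && q.1 == 0)) = true then 2 * q.2.1 else 0) +
                 (if (bp == "after" && !(bs && q.1 == 0)) = true then 2 * q.2.2 else 0)) := by
    intro total q
    split_ifs <;> ring
  simp only [hG, hBN, PySem.List.foldl_add]
  rw [PySem.List.sum_map_add_int, List.sum_map_mul_left]
  by_cases hbt : (bt == "batch") = true <;> simp [hbt] <;> ring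

theorem pv_find?_congr {α : Type} (l : List α) (p q : α → Bool)
    (h : ∀ x ∈ l, p x = q x) : l.find? p = l.find? q := by
  induction l with
  | nil => rfl
  | cons a t ih =>
    simp only [List.find?]
    rw [h a (by simp)]
    cases q a
    · exact ih (fun x hx => h x (by simp [hx]))
    · rfl

theorem pv_selL (l : List Int) (f : Int → Int) (tp : Int) (q : Int × Int) :
    l.foldl (fun best n =>
        if (match best with
            | none => true
            | some t => decide (|f n - tp| < t.1)) = true
        then some (|f n - tp|, n, f n) else best) (some (|q.2 - tp|, q.1, q.2))
    = (PySem.List.min? (q :: l.map (fun n => (n, f n))) (fun p => |p.2 - tp|)).map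
        (fun p => (|p.2 - tp|, p.1, p.2)) := by
  induction l generalizing q with
  | nil => simp [PySem.List.min?]
  | cons n l ih =>
    by_cases h : |f n - tp| < |q.2 - tp|
    · simp only [List.foldl_cons, List.map_cons]
      rw [show (if (match (some (|q.2 - tp|, q.1, q.2)) with
            | none => true
            | some t => decide (|f n - tp| < t.1)) = true
          then some (|f n - tp|, n, f n) else some (|q.2 - tp|, q.1, q.2)) = some (|f n - tp|, n, f n) from by simp [h]]
      rw [ih (n, f n)]
      simp [PySem.List.min?, h]
    · simp only [List.foldl_cons, List.map_cons]
      rw [show (if (match (some (|q.2 - tp|, q.1, q.2)) with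
            | none => true
            | some t => decide (|f n - tp| < t.1)) = true
          then some (|f n - tp|, n, f n) else some (|q.2 - tp|, q.1, q.2)) = some (|q.2 - tp|, q.1, q.2) from by simp [h]]
      rw [ih q]
      simp [PySem.List.min?, h]

theorem pv_fold_eq_min (l : List Int) (f : Int → Int) (tp : Int) :
    l.foldl (fun best n =>
        if (match best with
            | none => true
            | some t => decide (|f n - tp| < t.1)) = true
        then some (|f n - tp|, n, f n) else best) none
    = (PySem.List.min? (l.map (fun n => (n, f n))) (fun p => |p.2 - tp|)).map
        (fun p => (|p.2 - tp|, p.1, p.2)) := by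
  cases l with
  | nil => rfl
  | cons n l =>
    simp only [List.foldl_cons, List.map_cons]
    rw [if_pos (by trivial)]
    simpa using pv_selL l f tp (n, f n)

theorem pv_main (target_params : Int) (arch : List Int) (input_dim final_dim degree : Int)
    (bn_type bn_position : String) (bn_skip_first : Bool) (residual_type : String) (prefer_leq : Bool) :
    choose_kan_basis_for_parity target_params arch input_dim final_dim degree bn_type bn_position bn_skip_first residual_type prefer_leq
      = choose_kan_basis_for_parity_alt target_params arch input_dim final_dim degree bn_type bn_position bn_skip_first residual_type prefer_leq := by
  unfold choose_kan_basis_for_parity choose_kan_basis_for_parity_alt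
  dsimp only
  simp only [pv_kpc_eq]
  set sc := pvAffine arch input_dim final_dim bn_type bn_position bn_skip_first residual_type with hsc
  cases prefer_leq
  · simp only [Bool.false_eq_true, if_false]
    rw [PySem.List.foldl_congr_mem' _ _
        (fun (best : Option (Int × Int × Int)) (n : Int) =>
          if (match best with
              | none => true
              | some t => decide (|sc.2 + sc.1 * n - target_params| < t.1)) = true
          then some (|sc.2 + sc.1 * n - target_params|, n, sc.2 + sc.1 * n) else best)
        _ (by
          intro x hx acc
          have hm : max x (degree + 1) = x := by
            have := (PySem.List.mem_pyRange_one.1 hx).1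
            omega
          rw [hm])]
    rw [pv_find?_congr _ _ (fun n => decide (sc.2 + sc.1 * n ≥ target_params)) (by
          intro x hx
          have hm : max x (degree + 1) = x := by
            have := (PySem.List.mem_pyRange_one.1 hx).1
            omega
          rw [hm])]
    simp only [pv_fold_eq_min, List.find?_map, Function.comp_def]
    cases hres : PySem.List.min? (List.map (fun n => (n, sc.2 + sc.1 * n)) (PySem.List.pyRange (degree + 1) 200)) (fun p => |p.2 - target_params|) with
    | some p => rfl
    | none =>
      cases hfind : List.find? (fun n => decide (sc.2 + sc.1 * n ≥ target_params)) (PySem.List.pyRange (degree + 1) 200) with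
      | none => rfl
      | some n =>
        have hmem := List.mem_of_find?_eq_some hfind
        have hm : max n (degree + 1) = n := by
          have := (PySem.List.mem_pyRange_one.1 hmem).1
          omega
        simp [hm]
  · simp only [if_true]
    rw [PySem.List.foldl_congr_mem' _ _
        (fun (best : Option (Int × Int × Int)) (n : Int) =>
          if (decide (sc.2 + sc.1 * n ≤ target_params) && (match best with
              | none => true
              | some t => decide (|sc.2 + sc.1 * n - target_params| < t.1))) = true
          then some (|sc.2 + sc.1 * n - target_params|, n, sc.2 + sc.1 * n) else best)
        _ (by
          intro x hx acc
          have hm : max x (degree + 1) = x := by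
            have := (PySem.List.mem_pyRange_one.1 hx).1
            omega
          rw [hm])]
    rw [pv_find?_congr _ _ (fun n => decide (sc.2 + sc.1 * n ≥ target_params)) (by
          intro x hx
          have hm : max x (degree + 1) = x := by
            have := (PySem.List.mem_pyRange_one.1 hx).1
            omega
          rw [hm])]
    have hsplit : ∀ (c d : Bool) (u v : Option (Int × Int × Int)),
        (if (c && d) = true then u else v) = if c = true then (if d = true then u else v) else v := by
      intro c d u v
      cases c <;> cases d <;> simp
    simp only [hsplit]
    simp only [PySem.List.foldl_if_eq_foldl_filter]
    simp only [pv_fold_eq_min, List.filter_map, List.find?_map, Function.comp_def]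
    cases hres : PySem.List.min? (List.map (fun n => (n, sc.2 + sc.1 * n)) (List.filter (fun n => decide (sc.2 + sc.1 * n ≤ target_params)) (PySem.List.pyRange (degree + 1) 200))) (fun p => |p.2 - target_params|) with
    | some p => rfl
    | none =>
      cases hfind : List.find? (fun n => decide (sc.2 + sc.1 * n ≥ target_params)) (PySem.List.pyRange (degree + 1) 200) with
      | none => rfl
      | some n =>
        have hmem := List.mem_of_find?_eq_some hfind
        have hm : max n (degree + 1) = n := by
          have := (PySem.List.mem_pyRange_one.1 hmem).1
          omega
        simp [hm]

-- ===== VERDICT (by name: the statement is the Claim_ definition above) =====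
theorem choose_kan_basis_for_parity_spec : Claim_equal_choose_kan_basis_for_parity := by
  unfold Claim_equal_choose_kan_basis_for_parity Spec_choose_kan_basis_for_parity
  intro target_params arch input_dim final_dim degree bn_type bn_position bn_skip_first residual_type prefer_leq _
  exact pv_main target_params arch input_dim final_dim degree bn_type bn_position bn_skip_first residual_type prefer_leq
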